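-- pv_equiv track=rewrite | github.com/johnny1304/AdventOfCode2024 | avoc2024/Day3/day3.py | extractActiveMultiplication
-- ===== SOURCE A (Python) =====
-- def extractActiveMultiplication(complete_line):
--     donts = complete_line.split("don't()")
--     do = ""
--     for i in range(0, len(donts)):
--         if i==0:
--             do = do+donts[i]
--         else:
--             dos = donts[i].split("do()")
--             for i in range(1,len(dos)):
--                 do = do + dos[i]
--     return do
-- ===== SOURCE B (Python) =====
-- def extractActiveMultiplication(complete_line):
--     # Single character-level pass with a 3-state machine instead of nested splits.
--     # state 0: initial text (kept verbatim), 1: disabled after don't(), 2: enabled after do()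
--     out = []
--     s = complete_line
--     n = len(s)
--     i = 0
--     state = 0
--     while i < n:
--         if s.startswith("don't()", i):
--             state = 1
--             i += 7
--         elif state != 0 and s.startswith("do()", i):
--             state = 2
--             i += 4
--         else:
--             if state != 1:
--                 out.append(s[i])
--             i += 1
--     return "".join(out)
-- ===== Notes on version B (the rewrite author's own statement) =====
-- stated objective: alternative
-- what changed: A's nested split("don't()")/split("do()") passes with repeated string concatenation are replaced by a single left-to-right character scan driven by a three-state machine (initial/disabled/enabled-after-do) that emits kept characters into a list joined once.
import Mathlib
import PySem

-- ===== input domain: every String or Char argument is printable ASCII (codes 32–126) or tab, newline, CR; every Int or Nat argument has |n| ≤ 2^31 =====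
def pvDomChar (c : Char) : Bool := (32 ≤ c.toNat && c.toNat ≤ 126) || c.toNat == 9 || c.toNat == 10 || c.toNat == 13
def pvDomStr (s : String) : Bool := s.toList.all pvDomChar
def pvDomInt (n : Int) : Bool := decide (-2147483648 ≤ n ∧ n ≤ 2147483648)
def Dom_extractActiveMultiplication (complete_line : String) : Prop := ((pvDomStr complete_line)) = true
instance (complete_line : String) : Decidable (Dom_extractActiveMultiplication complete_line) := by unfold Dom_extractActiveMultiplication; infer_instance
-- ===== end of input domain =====

-- B replaces A's nested split()s with a single character-level three-state pass (alternative decomposition, same result).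

-- ===== PORT A =====
def pvDontTok : List Char := ['d', 'o', 'n', '\'', 't', '(', ')']   -- "don't()".toList
def pvDoTok : List Char := ['d', 'o', '(', ')']                      -- "do()".toList

def extractActiveMultiplication (complete_line : String) : String :=
  let donts := PySem.Chars.splitOn complete_line.toList pvDontTok
  String.ofList <|
    (PySem.List.pyRange 0 (PySem.List.len donts)).foldl
      (fun d i =>
        if i == 0 then d ++ PySem.List.pyGetD donts i []
        else
          let dos := PySem.Chars.splitOn (PySem.List.pyGetD donts i []) pvDoTok
          (PySem.List.pyRange 1 (PySem.List.len dos)).foldl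
            (fun d j => d ++ PySem.List.pyGetD dos j []) d)
      []

-- ===== PORT B =====
-- state 0: initial text (kept verbatim), 1: disabled after don't(), 2: enabled after do()
def pvAltGo : List Char → Nat → List Char
  | [], _ => []
  | c :: rest, state =>
    if pvDontTok.isPrefixOf (c :: rest) then pvAltGo ((c :: rest).drop 7) 1
    else if state != 0 && pvDoTok.isPrefixOf (c :: rest) then pvAltGo ((c :: rest).drop 4) 2
    else if state != 1 then c :: pvAltGo rest state
    else pvAltGo rest state
termination_by l _ => l.length
decreasing_by all_goals (simp [List.length_drop]; try omega)

def extractActiveMultiplication_alt (complete_line : String) : String :=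
  String.ofList (pvAltGo complete_line.toList 0)

-- ===== PRECONDITION & SPEC =====
def Spec_extractActiveMultiplication (complete_line : String) (out : String) : Prop := out = extractActiveMultiplication_alt complete_line
instance (complete_line : String) (out : String) : Decidable (Spec_extractActiveMultiplication complete_line out) := by unfold Spec_extractActiveMultiplication; infer_instance

-- ===== CLAIM (what is proved, stated in full; the proofs are below) =====
def Claim_equal_extractActiveMultiplication : Prop := ∀ (complete_line : String), Dom_extractActiveMultiplication complete_line → Spec_extractActiveMultiplication complete_line (extractActiveMultiplication complete_line)

-- ===== LEMMAS AND PROOFS =====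

/-- Prepend a char to the first piece of a split result. -/
def pvConsHead (c : Char) : List (List Char) → List (List Char)
  | [] => [[c]]
  | h :: t => (c :: h) :: t

/-- Prepend a finished prefix to the first piece. -/
def pvGlue (p : List Char) : List (List Char) → List (List Char)
  | [] => [p]
  | h :: t => (p ++ h) :: t

/-- Structural-recursive specification of `PySem.Chars.splitOn` for a nonempty separator. -/
def pvSplit (x : Char) (xs : List Char) : List Char → List (List Char)
  | [] => [[]]
  | c :: rest =>
    if (x :: xs).isPrefixOf (c :: rest) then
      [] :: pvSplit x xs ((c :: rest).drop (x :: xs).length)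
    else pvConsHead c (pvSplit x xs rest)
termination_by l => l.length
decreasing_by all_goals (simp [List.length_drop]; try omega)

def pvF (chunk : List Char) : List Char := ((pvSplit 'd' ['o', '(', ')'] chunk).tail).flatten
def pvG (chunk : List Char) : List Char := (pvSplit 'd' ['o', '(', ')'] chunk).flatten

theorem pvSplit_nil (x : Char) (xs : List Char) : pvSplit x xs [] = [[]] := by
  rw [pvSplit]

theorem pvSplit_cons_pos (x : Char) (xs : List Char) (c : Char) (rest : List Char)
    (hpre : (x :: xs).isPrefixOf (c :: rest)) :
    pvSplit x xs (c :: rest) = [] :: pvSplit x xs (List.drop xs.length rest) := by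
  rw [pvSplit, if_pos hpre]
  simp

theorem pvSplit_cons_neg (x : Char) (xs : List Char) (c : Char) (rest : List Char)
    (hpre : ¬ (x :: xs).isPrefixOf (c :: rest)) :
    pvSplit x xs (c :: rest) = pvConsHead c (pvSplit x xs rest) := by
  rw [pvSplit, if_neg hpre]

theorem pvGlue_append (p : List Char) (c : Char) (v : List (List Char)) :
    pvGlue (p ++ [c]) v = pvGlue p (pvConsHead c v) := by
  cases v <;> simp [pvGlue, pvConsHead]

theorem pvSplit_shape (x : Char) (xs : List Char) (s : List Char) :
    ∃ h t, pvSplit x xs s = h :: t ∧ h <+: s := by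
  induction s using pvSplit.induct x xs with
  | case1 => exact ⟨[], [], pvSplit_nil x xs, List.nil_prefix⟩
  | case2 c rest hpre ih =>
      exact ⟨[], pvSplit x xs (List.drop xs.length rest),
        pvSplit_cons_pos x xs c rest hpre, List.nil_prefix⟩
  | case3 c rest hpre ih =>
      obtain ⟨h, t, hs, hp⟩ := ih
      refine ⟨c :: h, t, ?_, ?_⟩
      · rw [pvSplit_cons_neg x xs c rest hpre, hs, pvConsHead]
      · obtain ⟨u, hu⟩ := hp; exact ⟨u, by simp [hu]⟩

theorem pvGo_eq (x : Char) (xs : List Char) :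
    ∀ (fuel : Nat) (l cur : List Char) (acc : List (List Char)), l.length < fuel →
      PySem.Chars.splitOn.go (x :: xs) fuel l cur acc =
        acc.reverse ++ pvGlue cur.reverse (pvSplit x xs l) := by
  intro fuel
  induction fuel with
  | zero => intro l cur acc h; omega
  | succ f ih =>
      intro l cur acc h
      cases l with
      | nil =>
          rw [PySem.Chars.splitOn.go.eq_def]
          simp [pvSplit_nil, pvGlue]
      | cons c rest =>
          rw [PySem.Chars.splitOn.go.eq_def]
          simp only []
          by_cases hpre : (x :: xs).isPrefixOf (c :: rest)
          · rw [if_pos hpre, ih _ _ _ (by simp at h ⊢; omega)]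
            rw [pvSplit_cons_pos x xs c rest hpre]
            obtain ⟨h', t', hs, -⟩ := pvSplit_shape x xs (List.drop xs.length rest)
            simp [hs, pvGlue]
          · rw [if_neg hpre, ih _ _ _ (by simp at h ⊢; omega)]
            rw [pvSplit_cons_neg x xs c rest hpre]
            simp only [List.reverse_cons]
            rw [pvGlue_append]

theorem pvSplitOn_eq (x : Char) (xs : List Char) (s : List Char) :
    PySem.Chars.splitOn s (x :: xs) = pvSplit x xs s := by
  unfold PySem.Chars.splitOn
  rw [pvGo_eq x xs (s.length + 1) s [] [] (by omega)]
  obtain ⟨h, t, hs, -⟩ := pvSplit_shape x xs s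
  simp [hs, pvGlue]

theorem pvF_nil : pvF [] = [] := by simp [pvF, pvSplit_nil]
theorem pvG_nil : pvG [] = [] := by simp [pvG, pvSplit_nil]

-- the main three-state invariant of B's scanner against the nested-split decomposition
theorem pvAlt_inv : ∀ (n : Nat) (s : List Char), s.length ≤ n →
    ∀ h t, pvSplit 'd' ['o', 'n', '\'', 't', '(', ')'] s = h :: t →
      pvAltGo s 0 = h ++ (t.map pvF).flatten
      ∧ pvAltGo s 1 = ((h :: t).map pvF).flatten
      ∧ pvAltGo s 2 = pvG h ++ (t.map pvF).flatten := by
  intro n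
  induction n with
  | zero =>
      intro s hlen h t hs
      have hsnil : s = [] := List.eq_nil_of_length_eq_zero (by omega)
      subst hsnil
      rw [pvSplit_nil] at hs
      injection hs with h1 h2
      subst h1; subst h2
      refine ⟨?_, ?_, ?_⟩ <;> simp [pvAltGo, pvF_nil, pvG_nil]
  | succ n ih =>
      intro s hlen h t hs
      cases s with
      | nil =>
          rw [pvSplit_nil] at hs
          injection hs with h1 h2
          subst h1; subst h2
          refine ⟨?_, ?_, ?_⟩ <;> simp [pvAltGo, pvF_nil, pvG_nil]
      | cons c rest =>
          by_cases hdont : pvDontTok.isPrefixOf (c :: rest)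
          · -- don't() at the head: all states jump to state 1 past the marker
            rw [pvSplit_cons_pos 'd' ['o', 'n', '\'', 't', '(', ')'] c rest hdont] at hs
            injection hs with h1 h2
            subst h1
            obtain ⟨h6, t6, hs6, -⟩ := pvSplit_shape 'd' ['o', 'n', '\'', 't', '(', ')'] (List.drop (['o', 'n', '\'', 't', '(', ')'] : List Char).length rest)
            have hlen6 : (List.drop (['o', 'n', '\'', 't', '(', ')'] : List Char).length rest).length ≤ n := by
              simp at hlen ⊢; omega
            have IH := ih _ hlen6 h6 t6 hs6
            have hgo : ∀ st, pvAltGo (c :: rest) st = pvAltGo (List.drop 6 rest) 1 := by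
              intro st
              rw [pvAltGo]
              simp [hdont]
            rw [← h2, hs6]
            refine ⟨?_, ?_, ?_⟩ <;>
              simp only [hgo, List.map_cons, List.flatten_cons, pvF_nil, pvG_nil, List.nil_append] <;>
              exact IH.2.1
          · -- no don't() at the head
            rw [pvSplit_cons_neg 'd' ['o', 'n', '\'', 't', '(', ')'] c rest hdont] at hs
            obtain ⟨hr, tr, hsr, hpr⟩ := pvSplit_shape 'd' ['o', 'n', '\'', 't', '(', ')'] rest
            rw [hsr, pvConsHead] at hs
            injection hs with h1 h2
            subst h1; subst h2
            have hlenr : rest.length ≤ n := by simp at hlen; omega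
            have IH := ih rest hlenr hr tr hsr
            have L0 : pvAltGo (c :: rest) 0 = (c :: hr) ++ (tr.map pvF).flatten := by
              rw [pvAltGo]
              simp only [hdont, if_false, Bool.false_and, bne_self_eq_false]
              simp [IH.1]
            by_cases hdo : pvDoTok.isPrefixOf (c :: rest)
            · -- do() at the head: states 1 and 2 jump to state 2 past the marker
              obtain ⟨s4, hs4⟩ := List.isPrefixOf_iff_prefix.mp hdo
              rw [show pvDoTok = ['d', 'o', '(', ')'] from rfl] at hs4
              simp only [List.cons_append, List.nil_append] at hs4
              injection hs4 with hc1 hc2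
              subst hc1; subst hc2
              obtain ⟨h4, t4, hs44, -⟩ := pvSplit_shape 'd' ['o', 'n', '\'', 't', '(', ')'] s4
              have hrest : pvSplit 'd' ['o', 'n', '\'', 't', '(', ')'] ('o' :: '(' :: ')' :: s4)
                  = ('o' :: '(' :: ')' :: h4) :: t4 := by
                rw [pvSplit_cons_neg _ _ _ _ (by simp [List.isPrefixOf])]
                rw [pvSplit_cons_neg _ _ _ _ (by simp [List.isPrefixOf])]
                rw [pvSplit_cons_neg _ _ _ _ (by simp [List.isPrefixOf])]
                rw [hs44]
                simp [pvConsHead]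
              rw [hrest] at hsr
              injection hsr with he1 he2
              subst he1; subst he2
              have hlen4 : s4.length ≤ n := by simp at hlen; omega
              have IH4 := ih s4 hlen4 h4 t4 hs44
              have hFh : pvF ('d' :: 'o' :: '(' :: ')' :: h4) = pvG h4 := by
                unfold pvF pvG
                rw [pvSplit_cons_pos _ _ _ _ (by simp [List.isPrefixOf])]
                simp
              have hGh : pvG ('d' :: 'o' :: '(' :: ')' :: h4) = pvG h4 := by
                unfold pvG
                rw [pvSplit_cons_pos _ _ _ _ (by simp [List.isPrefixOf])]
                simp
              have hgo12 : ∀ st, st ≠ 0 → pvAltGo ('d' :: 'o' :: '(' :: ')' :: s4) st = pvAltGo s4 2 := by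
                intro st hst
                rw [pvAltGo, if_neg hdont, if_pos (by simp [hst, hdo])]
                simp
              refine ⟨L0, ?_, ?_⟩
              · rw [hgo12 1 (by omega), IH4.2.2]
                simp [hFh]
              · rw [hgo12 2 (by omega), IH4.2.2, hGh]
            · -- no marker at the head: a plain character step in every state
              have hch : c :: hr <+: c :: rest := by
                exact List.cons_prefix_cons.mpr ⟨rfl, hpr⟩
              have hnd : ¬ (('d' : Char) :: ['o', '(', ')']).isPrefixOf (c :: hr) := by
                intro hp
                apply hdo
                rw [show pvDoTok = ['d', 'o', '(', ')'] from rfl, List.isPrefixOf_iff_prefix]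
                exact (List.isPrefixOf_iff_prefix.mp hp).trans hch
              have hFr : pvF (c :: hr) = pvF hr := by
                unfold pvF
                rw [pvSplit_cons_neg _ _ _ _ hnd]
                obtain ⟨h', t', hs', -⟩ := pvSplit_shape 'd' ['o', '(', ')'] hr
                rw [hs']
                simp [pvConsHead]
              have hGr : pvG (c :: hr) = c :: pvG hr := by
                unfold pvG
                rw [pvSplit_cons_neg _ _ _ _ hnd]
                obtain ⟨h', t', hs', -⟩ := pvSplit_shape 'd' ['o', '(', ')'] hr
                rw [hs']
                simp [pvConsHead]
              have hdo' : pvDoTok.isPrefixOf (c :: rest) = false := by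
                simp [hdo]
              refine ⟨L0, ?_, ?_⟩
              · rw [pvAltGo]
                simp only [hdont, if_false, hdo', Bool.and_false]
                simp [IH.2.1, hFr]
              · rw [pvAltGo]
                simp only [hdont, if_false, hdo', Bool.and_false]
                simp [IH.2.2, hGr]

theorem pvFoldl_append_flatten (l : List (List Char)) (init : List Char) :
    l.foldl (fun d p => d ++ p) init = init ++ l.flatten := by
  induction l generalizing init with
  | nil => simp
  | cons p l ih => simp [ih, List.append_assoc]

theorem pvFoldl_pvF (l : List (List Char)) (init : List Char) :
    l.foldl (fun d p => d ++ pvF p) init = init ++ (l.map pvF).flatten := by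
  induction l generalizing init with
  | nil => simp
  | cons p l ih => simp [ih, List.append_assoc]

-- the inner loop of A computes pvF of its chunk
theorem pvInner_eq (chunk d : List Char) :
    (PySem.List.pyRange 1 (PySem.List.len (PySem.Chars.splitOn chunk pvDoTok))).foldl
      (fun d j => d ++ PySem.List.pyGetD (PySem.Chars.splitOn chunk pvDoTok) j []) d
    = d ++ pvF chunk := by
  rw [PySem.List.foldl_pyRange_pyGetD _ _ (fun d p => d ++ p) _ (by norm_num : (0:Int) ≤ 1)]
  rw [pvFoldl_append_flatten]
  rw [show pvDoTok = 'd' :: ['o', '(', ')'] from rfl, pvSplitOn_eq]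
  obtain ⟨h, t, hs, -⟩ := pvSplit_shape 'd' ['o', '(', ')'] chunk
  simp [hs, pvF]

theorem pvA_eq (s : String) (h : List Char) (t : List (List Char))
    (hs : pvSplit 'd' ['o', 'n', '\'', 't', '(', ')'] s.toList = h :: t) :
    extractActiveMultiplication s = String.ofList (h ++ (t.map pvF).flatten) := by
  unfold extractActiveMultiplication
  have hsp : PySem.Chars.splitOn s.toList pvDontTok = h :: t := by
    rw [show pvDontTok = 'd' :: ['o', 'n', '\'', 't', '(', ')'] from rfl, pvSplitOn_eq]; exact hs
  simp only [hsp]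
  rw [PySem.List.pyRange_one_cons (by simp [PySem.List.len])]
  simp only [List.foldl_cons]
  have hinit : (if (0 : Int) == 0 then ([] : List Char) ++ PySem.List.pyGetD (h :: t) 0 [] else
      (PySem.List.pyRange 1 (PySem.List.len (PySem.Chars.splitOn (PySem.List.pyGetD (h :: t) 0 []) pvDoTok))).foldl
        (fun d j => d ++ PySem.List.pyGetD (PySem.Chars.splitOn (PySem.List.pyGetD (h :: t) 0 []) pvDoTok) j []) []) = h := by
    have h0 : PySem.List.pyGetD (h :: t) 0 [] = h := PySem.List.pyGetD_natCast (h :: t) 0 []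
    simp [h0]
  rw [PySem.List.foldl_congr_mem _ _
        (fun (d : List Char) (i : Int) => d ++ pvF (PySem.List.pyGetD (h :: t) i [])) _
        ?_]
  · rw [hinit]
    simp only [zero_add]
    rw [PySem.List.foldl_pyRange_pyGetD (h :: t) [] (fun d chunk => d ++ pvF chunk) h (by norm_num : (0:Int) ≤ 1)]
    simp only [Int.toNat_one, List.drop_succ_cons, List.drop_zero]
    rw [pvFoldl_pvF]
  · intro acc i hi
    have h1 : (1 : Int) ≤ i := (PySem.List.mem_pyRange_one.mp hi).1
    have hne : (i == (0 : Int)) = false := by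
      simp; omega
    simp only [hne, Bool.false_eq_true, if_false]
    exact pvInner_eq (PySem.List.pyGetD (h :: t) i []) acc

-- ===== VERDICT (by name: the statement is the Claim_ definition above) =====
theorem extractActiveMultiplication_spec : Claim_equal_extractActiveMultiplication := by
  intro s _
  unfold Spec_extractActiveMultiplication extractActiveMultiplication_alt
  obtain ⟨h, t, hs, -⟩ := pvSplit_shape 'd' ['o', 'n', '\'', 't', '(', ')'] s.toList
  rw [pvA_eq s h t hs, (pvAlt_inv s.toList.length s.toList le_rfl h t hs).1]
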